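-- pv_equiv track=rewrite | github.com/kdqwrt/bot_tictactoe | display.py | format_board_as_emoji
-- ===== SOURCE A (Python) =====
-- def format_board_as_emoji(board, field_size):
--     symbols = {"X": "❌", "O": "⭕", "": "⬜"}
--     display = ""
--     for i, cell in enumerate(board):
--         display += symbols[cell]
--         if (i + 1) % field_size == 0:
--             display += "\n"
--     return display
-- ===== SOURCE B (Python) =====
-- def format_board_as_emoji(board, field_size):
--     symbols = {"X": "\u274c", "O": "\u2b55", "": "\u2b1c"}
--     n = len(board)
--     parts = []
--     for i in range(0, n, field_size):
--         row = board[i:i + field_size]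
--         parts.append("".join(symbols[c] for c in row))
--         if i + field_size <= n:
--             parts.append("\n")
--     return "".join(parts)
-- ===== Notes on version B (the rewrite author's own statement) =====
-- stated objective: alternative
-- what changed: B renders the board row by row (chunking with range(0, n, field_size) and slicing, joining each row, appending the newline per complete row) instead of A's flat per-cell scan with a modulo counter.
-- outside the precondition, e.g. on format_board_as_emoji(['X', 'O'], -1): A returns '❌\n⭕\n', B returns ''; on format_board_as_emoji(['X'], -2): A returns '❌', B returns ''
import Mathlib
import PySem

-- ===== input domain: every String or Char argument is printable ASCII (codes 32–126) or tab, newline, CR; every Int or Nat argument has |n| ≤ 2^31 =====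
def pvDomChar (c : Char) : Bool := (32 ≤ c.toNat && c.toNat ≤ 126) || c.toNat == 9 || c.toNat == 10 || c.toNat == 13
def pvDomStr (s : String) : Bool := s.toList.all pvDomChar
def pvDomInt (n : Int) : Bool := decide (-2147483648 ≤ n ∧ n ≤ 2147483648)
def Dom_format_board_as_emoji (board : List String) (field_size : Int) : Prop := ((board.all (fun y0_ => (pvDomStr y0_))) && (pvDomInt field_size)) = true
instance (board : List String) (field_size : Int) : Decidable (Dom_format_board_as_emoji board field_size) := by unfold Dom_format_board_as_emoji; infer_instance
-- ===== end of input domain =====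

-- B renders the board row by row (chunk + join) instead of A's flat scan with a modulo
-- counter; same output, alternative decomposition (return value only, no mutation).

-- ===== PORT A =====
def format_board_as_emoji (board : List String) (field_size : Int) : String :=
  let symbols : PySem.Dict String String :=
    PySem.Dict.ofList [("X", "❌"), ("O", "⭕"), ("", "⬜")]
  (PySem.List.enumerate board).foldl
    (fun display ic =>
      let display := display ++ symbols.getD ic.2 ""
      if PySem.Int.mod (ic.1 + 1) field_size = 0 then display ++ "\n" else display)
    ""

-- ===== PORT B =====
def format_board_as_emoji_alt (board : List String) (field_size : Int) : String :=
  let symbols : PySem.Dict String String :=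
    PySem.Dict.ofList [("X", "❌"), ("O", "⭕"), ("", "⬜")]
  let n : Int := (board.length : Int)
  let parts : List String :=
    (PySem.List.pyRange 0 n field_size).foldl
      (fun parts i =>
        let row := PySem.List.slice board (some i) (some (i + field_size))
        let parts := parts ++ [PySem.Str.join "" (row.map (fun c => symbols.getD c ""))]
        if i + field_size ≤ n then parts ++ ["\n"] else parts)
      []
  PySem.Str.join "" parts

-- ===== PRECONDITION & SPEC =====
-- Pre_ excludes cells outside {"X","O",""} (A raises KeyError) and field_size = 0 (A raises
-- ZeroDivisionError on a non-empty board); it also excludes negative field_size, on which A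
-- still returns: there A's row breaks come from Python's sign-following modulo (it behaves
-- like |field_size|), an accident of the implementation, while B's empty range yields "" —
-- both values are equally defensible on a negative row size.
def Pre_format_board_as_emoji (board : List String) (field_size : Int) : Prop :=
  (∀ c ∈ board, c = "X" ∨ c = "O" ∨ c = "") ∧ 0 < field_size
instance (board : List String) (field_size : Int) : Decidable (Pre_format_board_as_emoji board field_size) := by
  unfold Pre_format_board_as_emoji; infer_instance

def pvWitness_format_board_as_emoji : List String × Int := (["X", "O", "", "O", "X"], 2)

def Spec_format_board_as_emoji (board : List String) (field_size : Int) (out : String) : Prop := out = format_board_as_emoji_alt board field_size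
instance (board : List String) (field_size : Int) (out : String) : Decidable (Spec_format_board_as_emoji board field_size out) := by unfold Spec_format_board_as_emoji; infer_instance

-- ===== CLAIM =====
def Claim_equal_format_board_as_emoji : Prop := ∀ (board : List String) (field_size : Int), Dom_format_board_as_emoji board field_size → Pre_format_board_as_emoji board field_size → Spec_format_board_as_emoji board field_size (format_board_as_emoji board field_size)

-- ===== LEMMAS AND PROOFS =====

-- the (total) cell renderer both ports share
def emoD (c : String) : String :=
  (PySem.Dict.ofList [("X", "❌"), ("O", "⭕"), ("", "⬜")]).getD c ""

def joinEmo : List String → String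
  | [] => ""
  | c :: r => emoD c ++ joinEmo r

-- row-chunked canonical form (row size f+1)
def canon (f : Nat) : List String → String
  | [] => ""
  | c :: rest =>
      joinEmo (c :: rest.take f) ++
        ((if f ≤ rest.length then "\n" else "") ++ canon f (rest.drop f))
  termination_by cells => cells.length
  decreasing_by simp

-- A's loop body, with the shared renderer
def stepA (fs : Int) (display : String) (ic : Int × String) : String :=
  let d := display ++ emoD ic.2
  if PySem.Int.mod (ic.1 + 1) fs = 0 then d ++ "\n" else d

-- flat countdown form (k cells left in the current row, row size f+1)
def flat (f : Nat) : List String → Nat → String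
  | [], _ => ""
  | c :: rest, k =>
      emoD c ++ (if k = 1 then "\n" ++ flat f rest (f + 1) else flat f rest (k - 1))

lemma A_eq_foldl (board : List String) (fs : Int) :
    format_board_as_emoji board fs = (PySem.List.enumerate board).foldl (stepA fs) "" := rfl

lemma stepA_shift (fs : Int) (d : String) (p : Int × String) :
    stepA fs d p = d ++ stepA fs "" p := by
  unfold stepA
  split <;> simp [String.append_assoc]

lemma foldA_acc (fs : Int) (l : List (Int × String)) (d : String) :
    l.foldl (stepA fs) d = d ++ l.foldl (stepA fs) "" := by
  induction l generalizing d with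
  | nil => simp
  | cons p l ih =>
      simp only [List.foldl_cons]
      rw [ih (stepA fs d p), ih (stepA fs "" p), stepA_shift, String.append_assoc]

lemma A_flat (f : Nat) (cells : List String) (j : Int) (k : Nat)
    (hj : 0 ≤ j) (hk1 : 1 ≤ k) (hk2 : k ≤ f + 1) (hdvd : ((f : Int) + 1) ∣ (j + k)) :
    (PySem.List.enumerate cells j).foldl (stepA ((f : Int) + 1)) "" = flat f cells k := by
  induction cells generalizing j k with
  | nil => simp [PySem.List.enumerate_nil, flat]
  | cons c rest ih =>
      rw [PySem.List.enumerate_cons, List.foldl_cons, foldA_acc]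
      by_cases hk : k = 1
      · subst hk
        have hd1 : ((f : Int) + 1) ∣ (j + 1) := by simpa using hdvd
        have hc : PySem.Int.mod (j + 1) ((f : Int) + 1) = 0 :=
          (PySem.Int.mod_eq_zero_iff_dvd _ _).2 hd1
        have hrec := ih (j + 1) (f + 1) (by omega) (by omega) le_rfl
          (by
            refine dvd_add hd1 ⟨1, ?_⟩
            push_cast; ring)
        simp [stepA, flat, hc, hd1, hrec, String.append_assoc]
      · have hk2' : 2 ≤ k := by omega
        have hnd : ¬ ((f : Int) + 1) ∣ (j + 1) := by
          intro h
          have h2 : ((f : Int) + 1) ∣ ((j + (k : Int)) - (j + 1)) := dvd_sub hdvd h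
          have h3 : ((j : Int) + (k : Int)) - (j + 1) = (k : Int) - 1 := by ring
          rw [h3] at h2
          have := Int.le_of_dvd (by omega) h2
          omega
        have hc : ¬ PySem.Int.mod (j + 1) ((f : Int) + 1) = 0 := fun h =>
          hnd ((PySem.Int.mod_eq_zero_iff_dvd _ _).1 h)
        have hrec := ih (j + 1) (k - 1) (by omega) (by omega) (by omega)
          (by
            have hcast : ((k - 1 : Nat) : Int) = (k : Int) - 1 := by omega
            rw [hcast]
            have h4 : (j : Int) + 1 + ((k : Int) - 1) = j + k := by ring
            rw [h4]; exact hdvd)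
        simp [stepA, flat, hnd, hk, hrec]

lemma flat_chunk (f : Nat) (cells : List String) (k : Nat) (hk1 : 1 ≤ k) (hk2 : k ≤ f + 1) :
    flat f cells k =
      joinEmo (cells.take k) ++
        (if k ≤ cells.length then "\n" ++ flat f (cells.drop k) (f + 1) else "") := by
  induction cells generalizing k with
  | nil =>
      simp only [flat, List.take_nil, joinEmo, List.length_nil]
      rw [if_neg (by omega)]
      simp
  | cons c rest ih =>
      by_cases hk : k = 1
      · subst hk
        simp [flat, joinEmo]
      · obtain ⟨k', rfl⟩ : ∃ k', k = k' + 1 := ⟨k - 1, by omega⟩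
        have hk1' : 1 ≤ k' := by omega
        simp only [flat, if_neg hk, Nat.add_sub_cancel, List.take_succ_cons,
          List.drop_succ_cons, joinEmo]
        rw [ih k' hk1' (by omega)]
        simp only [show (k' + 1 ≤ (c :: rest).length) ↔ (k' ≤ rest.length) from by
          simp only [List.length_cons]; omega]
        simp [String.append_assoc]

lemma flat_eq_canon (f : Nat) (cells : List String) :
    flat f cells (f + 1) = canon f cells := by
  induction hn : cells.length using Nat.strong_induction_on generalizing cells with
  | _ n ihn =>
    match cells with
    | [] => simp [flat, canon]
    | c :: rest =>
        subst hn
        rw [flat_chunk f (c :: rest) (f + 1) (by omega) le_rfl]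
        rw [canon]
        simp only [List.take_succ_cons, List.drop_succ_cons, List.length_cons]
        by_cases hle : f ≤ rest.length
        · rw [if_pos (by omega), if_pos hle]
          rw [ihn (rest.drop f).length
            (by simp only [List.length_drop, List.length_cons]; omega) (rest.drop f) rfl]
          try simp [String.append_assoc]
        · rw [if_neg (by omega), if_neg hle]
          rw [List.drop_eq_nil_of_le (by omega)]
          simp [canon]

-- ===== B side =====

lemma join_empty_cons (s : String) (l : List String) :
    PySem.Str.join "" (s :: l) = s ++ PySem.Str.join "" l := by
  apply String.toList_injective
  cases l with
  | nil =>
      simp [PySem.Str.toList_join, String.toList_append, PySem.Chars.join_singleton,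
        PySem.Chars.join_nil]
  | cons t l' =>
      simp [PySem.Str.toList_join, String.toList_append, PySem.Chars.join_cons_cons]

lemma join_empty_append (l1 l2 : List String) :
    PySem.Str.join "" (l1 ++ l2) = PySem.Str.join "" l1 ++ PySem.Str.join "" l2 := by
  induction l1 with
  | nil => simp [show PySem.Str.join "" ([] : List String) = "" from rfl]
  | cons s l1 ih =>
      simp only [List.cons_append, join_empty_cons, ih, String.append_assoc]

lemma rowStr_eq_joinEmo (l : List String) :
    PySem.Str.join "" (l.map (fun c => emoD c)) = joinEmo l := by
  induction l with
  | nil => rfl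
  | cons c l ih => simp only [List.map_cons, join_empty_cons, ih, joinEmo]

lemma pyRange_shift (a b s : Int) (hs : 0 < s) :
    PySem.List.pyRange a b s = (PySem.List.pyRange 0 (b - a) s).map (fun x => a + x) := by
  rw [PySem.List.pyRange_of_pos _ _ hs, PySem.List.pyRange_of_pos _ _ hs, List.map_map]
  simp only [sub_zero, show ((0 : Int) < b - a) ↔ (a < b) from sub_pos]
  apply List.map_congr_left
  intro k _
  simp only [Function.comp]
  ring

lemma pyRange_pos_cons (a b s : Int) (hs : 0 < s) (hab : a < b) :
    PySem.List.pyRange a b s = a :: PySem.List.pyRange (a + s) b s := by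
  rw [PySem.List.pyRange_of_pos _ _ hs, PySem.List.pyRange_of_pos _ _ hs]
  rw [if_pos hab]
  have hdiv : (b - a + s - 1) / s = (b - a - 1) / s + 1 := by
    have h1 : b - a + s - 1 = (b - a - 1) + 1 * s := by ring
    rw [h1, Int.add_mul_ediv_right _ _ (by omega)]
  by_cases hlt : a + s < b
  · rw [if_pos hlt]
    have h2 : b - (a + s) + s - 1 = b - a - 1 := by ring
    rw [h2]
    have hnn : 0 ≤ (b - a - 1) / s := Int.ediv_nonneg (by omega) (by omega)
    have hm : ((b - a + s - 1) / s).toNat = ((b - a - 1) / s).toNat + 1 := by omega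
    rw [hm, List.range_succ_eq_map, List.map_cons, List.map_map]
    simp only [Nat.cast_zero, mul_zero, add_zero, List.cons.injEq, true_and]
    apply List.map_congr_left
    intro k _
    simp only [Function.comp]
    push_cast
    ring
  · rw [if_neg hlt]
    have hz : (b - a - 1) / s = 0 := Int.ediv_eq_zero_of_lt (by omega) (by omega)
    have hm : ((b - a + s - 1) / s).toNat = 1 := by omega
    rw [hm]
    simp

def gB (cells : List String) (s : Int) (i : Int) : List String :=
  [PySem.Str.join "" ((PySem.List.slice cells (some i) (some (i + s))).map (fun c => emoD c))] ++
    (if i + s ≤ (cells.length : Int) then ["\n"] else [])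

lemma B_eq (cells : List String) (fs : Int) :
    format_board_as_emoji_alt cells fs =
      PySem.Str.join ""
        ((PySem.List.pyRange 0 (cells.length : Int) fs).foldl
          (fun parts i => parts ++ gB cells fs i) []) := by
  show PySem.Str.join ""
      ((PySem.List.pyRange 0 (cells.length : Int) fs).foldl
        (fun parts i =>
          if i + fs ≤ (cells.length : Int) then
            (parts ++
                [PySem.Str.join ""
                  ((PySem.List.slice cells (some i) (some (i + fs))).map
                    (fun c =>
                      (PySem.Dict.ofList [("X", "❌"), ("O", "⭕"), ("", "⬜")]).getD c ""))]) ++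
              ["\n"]
          else
            parts ++
              [PySem.Str.join ""
                ((PySem.List.slice cells (some i) (some (i + fs))).map
                  (fun c =>
                    (PySem.Dict.ofList [("X", "❌"), ("O", "⭕"), ("", "⬜")]).getD c ""))])
        []) = _
  congr 1
  have hf : (fun (parts : List String) (i : Int) =>
      if i + fs ≤ (cells.length : Int) then
        (parts ++
            [PySem.Str.join ""
              ((PySem.List.slice cells (some i) (some (i + fs))).map
                (fun c =>
                  (PySem.Dict.ofList [("X", "❌"), ("O", "⭕"), ("", "⬜")]).getD c ""))]) ++
          ["\n"]
      else
        parts ++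
          [PySem.Str.join ""
            ((PySem.List.slice cells (some i) (some (i + fs))).map
              (fun c =>
                (PySem.Dict.ofList [("X", "❌"), ("O", "⭕"), ("", "⬜")]).getD c ""))]) =
      (fun (parts : List String) (i : Int) => parts ++ gB cells fs i) := by
    funext parts i
    simp only [gB, emoD]
    split <;> simp
  rw [hf]

lemma pyRange_nonpos (b s : Int) (hs : 0 < s) (hb : b ≤ 0) :
    PySem.List.pyRange 0 b s = [] := by
  rw [PySem.List.pyRange_of_pos _ _ hs, if_neg (by omega)]
  simp

lemma B_flatMap_canon (f : Nat) (cells : List String) :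
    PySem.Str.join ""
        (List.flatMap (gB cells ((f : Int) + 1))
          (PySem.List.pyRange 0 (cells.length : Int) ((f : Int) + 1))) = canon f cells := by
  induction hn : cells.length using Nat.strong_induction_on generalizing cells with
  | _ n ihn =>
    match cells with
    | [] =>
        subst hn
        simp [pyRange_nonpos 0 ((f : Int) + 1) (by omega) le_rfl, canon,
          show PySem.Str.join "" ([] : List String) = "" from rfl]
    | c :: rest =>
        subst hn
        have hs : (0 : Int) < (f : Int) + 1 := by omega
        have hn1 : (0 : Int) < ((c :: rest).length : Int) := by
          simp only [List.length_cons]; omega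
        rw [pyRange_pos_cons 0 _ _ hs hn1, List.flatMap_cons, zero_add]
        rw [pyRange_shift ((f : Int) + 1) _ _ hs, List.flatMap_map]
        have hshift :
            List.flatMap (fun i => gB (c :: rest) ((f : Int) + 1) (((f : Int) + 1) + i))
                (PySem.List.pyRange 0 (((c :: rest).length : Int) - ((f : Int) + 1))
                  ((f : Int) + 1)) =
            List.flatMap (gB (rest.drop f) ((f : Int) + 1))
                (PySem.List.pyRange 0 (((rest.drop f).length : Int)) ((f : Int) + 1)) := by
          have hrange :
              PySem.List.pyRange 0 (((c :: rest).length : Int) - ((f : Int) + 1)) ((f : Int) + 1) =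
              PySem.List.pyRange 0 (((rest.drop f).length : Int)) ((f : Int) + 1) := by
            by_cases hle : f ≤ rest.length
            · congr 1
              simp only [List.length_cons, List.length_drop]
              omega
            · rw [pyRange_nonpos _ _ hs (by simp only [List.length_cons]; omega),
                pyRange_nonpos _ _ hs (by simp only [List.length_drop]; omega)]
          rw [hrange]
          apply List.flatMap_congr
          intro i hi
          rw [PySem.List.mem_pyRange_iff_of_pos hs] at hi
          obtain ⟨hi0, hiu, -⟩ := hi
          have hslice :
              PySem.List.slice (c :: rest) (some (((f : Int) + 1) + i))
                  (some ((((f : Int) + 1) + i) + ((f : Int) + 1))) =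
              PySem.List.slice (rest.drop f) (some i) (some (i + ((f : Int) + 1))) := by
            rw [PySem.List.slice_toNat _ (by omega) (by omega),
              PySem.List.slice_toNat _ (by omega) (by omega)]
            have h1 : rest.drop f = (c :: rest).drop (f + 1) := by simp
            rw [h1, List.drop_drop]
            congr 1
            · omega
            · congr 1
              omega
          have hcond : ((((f : Int) + 1) + i) + ((f : Int) + 1) ≤ ((c :: rest).length : Int)) ↔
              (i + ((f : Int) + 1) ≤ (((rest.drop f).length : Int))) := by
            simp only [List.length_cons, List.length_drop]
            omega
          simp only [gB, hslice, hcond]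
        rw [hshift, join_empty_append]
        rw [ihn (rest.drop f).length (by simp only [List.length_drop, List.length_cons]; omega)
          (rest.drop f) rfl]
        simp only [gB, zero_add]
        have hslice0 : PySem.List.slice (c :: rest) (some (0 : Int)) (some ((f : Int) + 1)) =
            c :: rest.take f := by
          rw [PySem.List.slice_toNat (c :: rest) (by omega) (by omega)]
          have h0 : ((f : Int) + 1).toNat = f + 1 := by omega
          rw [h0]
          simp [List.take_succ_cons]
        rw [hslice0, canon]
        simp only [show (((f : Int) + 1) ≤ ((c :: rest).length : Int)) ↔ (f ≤ rest.length) from by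
          simp only [List.length_cons]; omega]
        by_cases hle : f ≤ rest.length
        · rw [if_pos hle, if_pos hle, join_empty_append, join_empty_cons, join_empty_cons]
          rw [List.map_cons, join_empty_cons, rowStr_eq_joinEmo]
          simp only [joinEmo]
          simp [String.append_assoc, show PySem.Str.join "" ([] : List String) = "" from rfl]
        · rw [if_neg hle, if_neg hle]
          simp only [List.append_nil]
          rw [join_empty_cons, List.map_cons, join_empty_cons, rowStr_eq_joinEmo]
          simp only [joinEmo]
          simp [String.append_assoc, show PySem.Str.join "" ([] : List String) = "" from rfl]

lemma B_canon (f : Nat) (cells : List String) :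
    format_board_as_emoji_alt cells ((f : Int) + 1) = canon f cells := by
  rw [B_eq, PySem.List.foldl_append_eq_flatMap (gB cells ((f : Int) + 1)) _ [], List.nil_append]
  exact B_flatMap_canon f cells

-- ===== VERDICT =====
theorem format_board_as_emoji_spec : Claim_equal_format_board_as_emoji := by
  intro board fs _hdom hpre
  unfold Spec_format_board_as_emoji
  obtain ⟨hcells, hfs⟩ := hpre
  obtain ⟨f, rfl⟩ : ∃ f : Nat, fs = (f : Int) + 1 :=
    ⟨(fs - 1).toNat, by omega⟩
  rw [A_eq_foldl, B_canon, ← flat_eq_canon,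
    A_flat f board 0 (f + 1) le_rfl (by omega) le_rfl ⟨1, by push_cast; ring⟩]
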